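-- pv_equiv track=rewrite | github.com/joannakrawczyk99/cryptotask10 | main.py | modifyPixel
-- ===== SOURCE A (Python) =====
-- def convertData(img):
--     """
--     Converting encoding data into binary values using ascii characters.
--     :param data: encoding data
--     :return: binary values
--     """
--     dataset = []
--     for i in img:
--         dataset.append(format(ord(i), '08b'))
--     return dataset
--
-- def modifyPixel(pix, data):
--     """
--     Extrating pixels and modyfing them.
--     :param pix: pixels
--     :param data: 8-bit binary data
--     """
--     datalist = convertData(data)
--     lendata = len(datalist)
--     imdata = iter(pix)
--
--     for i in range(lendata):
--         pix = [value for value in imdata.__next__()[:3] +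
--                imdata.__next__()[:3] +
--                imdata.__next__()[:3]]
--
--         for j in range(0, 8):
--             if (datalist[i][j] == '0' and pix[j] % 2 != 0):
--                 pix[j] -= 1
--
--             elif (datalist[i][j] == '1' and pix[j] % 2 == 0):
--                 if (pix[j] != 0):
--                     pix[j] -= 1
--                 else:
--                     pix[j] += 1
--
--         if (i == lendata - 1):
--             if (pix[-1] % 2 == 0):
--                 if (pix[-1] != 0):
--                     pix[-1] -= 1
--                 else:
--                     pix[-1] += 1
--
--         else:
--             if (pix[-1] % 2 != 0):
--                 pix[-1] -= 1
--
--         pix = tuple(pix)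
--         yield pix[0:3]
--         yield pix[3:6]
--         yield pix[6:9]
-- ===== SOURCE B (Python) =====
-- def modifyPixel(pix, data):
--     """Flat-stream encoding: one whole-message bit list (computed by arithmetic
--     shifts, 8 bits per character plus a terminator flag bit), the needed pixel
--     channels flattened into one list, a single zip applying parity correction,
--     then re-chunked into triples."""
--     n = len(data)
--     bits = []
--     for k, ch in enumerate(data):
--         code = ord(ch)
--         for s in range(7, -1, -1):
--             bits.append((code >> s) & 1)
--         bits.append(1 if k == n - 1 else 0)
--     it = iter(pix)
--     flat = []
--     for _ in range(3 * n):
--         flat.extend(next(it)[:3])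
--     adjusted = [v if v % 2 == b else (v - 1 if v else 1)
--                 for v, b in zip(flat, bits)]
--     for k in range(0, len(adjusted), 3):
--         yield tuple(adjusted[k:k + 3])
-- ===== Notes on version B (the rewrite author's own statement) =====
-- stated objective: alternative
-- what changed: B replaces A's per-character processing (8-iteration bit loop over a formatted bit string plus a separately special-cased pix[-1] marker branch, per 3-pixel block) with a flat-stream pipeline: one whole-message bit list computed by arithmetic shifts (8 bits per character plus a terminator flag), the consumed channels flattened into one list, a single zip applying one parity-correction rule, then re-chunking into triples.
import Mathlib
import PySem

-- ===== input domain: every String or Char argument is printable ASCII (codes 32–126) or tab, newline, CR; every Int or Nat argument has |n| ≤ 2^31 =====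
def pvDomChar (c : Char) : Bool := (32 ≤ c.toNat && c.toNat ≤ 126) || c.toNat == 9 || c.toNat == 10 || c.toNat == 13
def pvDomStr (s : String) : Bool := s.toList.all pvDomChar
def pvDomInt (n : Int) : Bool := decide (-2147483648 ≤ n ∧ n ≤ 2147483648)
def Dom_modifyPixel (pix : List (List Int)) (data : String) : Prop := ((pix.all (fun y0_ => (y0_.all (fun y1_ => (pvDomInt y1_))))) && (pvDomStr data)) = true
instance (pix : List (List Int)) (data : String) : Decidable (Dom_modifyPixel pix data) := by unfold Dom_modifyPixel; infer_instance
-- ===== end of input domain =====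

-- B replaces A's per-character block loop (8-bit j-loop + special-cased pix[-1] branch)
-- with a flat-stream pipeline: one arithmetic whole-message bit list, one flattened
-- channel list, one zip applying parity correction, then re-chunking; objective: simpler.
-- Equivalence is about the returned (yielded) values.

-- ===== PORT A =====

-- format(ord(c), '08b') : the 8 binary digits of n (n < 256 on the domain)
def pvBin8 (n : Nat) : List Char :=
  (List.range 8).map (fun k => if n / 2 ^ (7 - k) % 2 = 1 then '1' else '0')

-- convertData
def convertData (img : List Char) : List (List Char) :=
  img.map (fun c => pvBin8 c.toNat)

-- in-place update pix[j] = f(pix[j]) (A reads pix[j] and writes it back)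
def pvModAt : List Int → Nat → (Int → Int) → List Int
  | [], _, _ => []
  | x :: xs, 0, f => f x :: xs
  | x :: xs, n + 1, f => x :: pvModAt xs n f

-- the body of A's inner j-loop, reading datalist[i][j]
def pvRuleA (c : Char) (v : Int) : Int :=
  if c = '0' ∧ v % 2 ≠ 0 then v - 1
  else if c = '1' ∧ v % 2 = 0 then (if v ≠ 0 then v - 1 else v + 1)
  else v

-- one iteration of A's outer loop body on the 9-slot block: the j-loop (j = 0..7),
-- then the special-cased pix[-1] marker branch
def pvEncodeA (d : List Char) (last : Bool) (px0 : List Int) : List Int :=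
  let px1 := (List.range 8).foldl (fun l j => pvModAt l j (pvRuleA (d.getD j ' '))) px0
  if last then
    pvModAt px1 (px1.length - 1) (fun v => if v % 2 = 0 then (if v ≠ 0 then v - 1 else v + 1) else v)
  else
    pvModAt px1 (px1.length - 1) (fun v => if v % 2 ≠ 0 then v - 1 else v)

-- A's outer loop: i counts up, three pixels are consumed per character,
-- three 3-slices are yielded.  (Where A raises — not enough pixels, or a consumed
-- pixel with fewer than 3 channels — Pre_ excludes the input; the [] fallbacks
-- are never reached inside Pre_.)
def modifyPixelGoA : List (List Char) → Nat → Nat → List (List Int) → List (List Int)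
  | [], _, _, _ => []
  | d :: ds, i, lendata, p1 :: p2 :: p3 :: rest =>
    let px := p1.take 3 ++ p2.take 3 ++ p3.take 3
    let px2 := pvEncodeA d (i == lendata - 1) px
    px2.take 3 :: ((px2.drop 3).take 3) :: ((px2.drop 6).take 3) :: modifyPixelGoA ds (i + 1) lendata rest
  | _ :: _, _, _, _ => []

def modifyPixel (pix : List (List Int)) (data : String) : List (List Int) :=
  let datalist := convertData data.toList
  modifyPixelGoA datalist 0 datalist.length pix

-- ===== PORT B =====

-- B's parity correction applied to one channel value v and one desired bit b
def pvAdjust (v : Int) (b : Nat) : Int :=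
  if v % 2 = (b : Int) then v else (if v ≠ 0 then v - 1 else 1)

-- the inner 'for s in range(7, -1, -1): bits.append((code >> s) & 1)'
def pvCharBits (code : Nat) : List Nat :=
  [7, 6, 5, 4, 3, 2, 1, 0].map (fun s => (code >>> s) % 2)

-- the 'for k, ch in enumerate(data)' loop building the whole-message bit list
def pvBitsB : List Char → Nat → Nat → List Nat
  | [], _, _ => []
  | c :: cs, k, n => pvCharBits c.toNat ++ [if k == n - 1 then 1 else 0] ++ pvBitsB cs (k + 1) n

-- the final 'for k in range(0, len(adjusted), 3): yield tuple(adjusted[k:k+3])'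
def pvChunk3 : List Int → List (List Int)
  | [] => []
  | x :: xs => (x :: xs.take 2) :: pvChunk3 (xs.drop 2)
termination_by l => l.length
decreasing_by simp

-- B: flat pipeline — bits, flattened channels (the 3*n next(it)[:3] calls; where
-- Python would raise StopIteration, Pre_ excludes the input), one zip, re-chunk
def modifyPixel_alt (pix : List (List Int)) (data : String) : List (List Int) :=
  let n := data.toList.length
  let bits := pvBitsB data.toList 0 n
  let flat := ((pix.take (3 * n)).map (fun p => p.take 3)).flatten
  let adjusted := List.zipWith pvAdjust flat bits
  pvChunk3 adjusted

-- ===== PRECONDITION & SPEC =====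
-- Pre_ excludes calls where fewer than 3*len(data) pixels are supplied or some
-- consumed pixel has fewer than 3 channels: there A raises (RuntimeError from
-- StopIteration, or IndexError at pix[j]), except for the degenerate shape where
-- a 9-slot block comes out exactly one short; that input is not a valid RGB pixel
-- stream, A and B both return but no value there is specified (see cites).
def Pre_modifyPixel (pix : List (List Int)) (data : String) : Prop :=
  3 * data.length ≤ pix.length ∧ ∀ p ∈ pix.take (3 * data.length), 3 ≤ p.length
instance (pix : List (List Int)) (data : String) : Decidable (Pre_modifyPixel pix data) := by unfold Pre_modifyPixel; infer_instance

def pvWitness_modifyPixel : List (List Int) × String := ([[1, 2, 3], [4, 5, 6], [7, 8, 9]], "A")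

def Spec_modifyPixel (pix : List (List Int)) (data : String) (out : List (List Int)) : Prop := out = modifyPixel_alt pix data
instance (pix : List (List Int)) (data : String) (out : List (List Int)) : Decidable (Spec_modifyPixel pix data out) := by unfold Spec_modifyPixel; infer_instance

-- ===== CLAIM (what is proved, stated in full; the proofs are below) =====
def Claim_equal_modifyPixel : Prop := ∀ (pix : List (List Int)) (data : String), Dom_modifyPixel pix data → Pre_modifyPixel pix data → Spec_modifyPixel pix data (modifyPixel pix data)

-- ===== LEMMAS AND PROOFS =====

-- proof-side intermediate: the per-character zip form of the encoding
def pvRuleB (t : Char) (v : Int) : Int :=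
  if t = '0' ∧ v % 2 ≠ 0 then v - 1
  else if t = '1' ∧ v % 2 = 0 then (if v ≠ 0 then v - 1 else 1)
  else v

def pvGoMid : List Char → Nat → Nat → List (List Int) → List (List Int)
  | [], _, _, _ => []
  | c :: cs, i, n, p1 :: p2 :: p3 :: rest =>
    let target := pvBin8 c.toNat ++ [if i == n - 1 then '1' else '0']
    let px := p1.take 3 ++ p2.take 3 ++ p3.take 3
    let out := List.zipWith pvRuleB target px
    out.take 3 :: ((out.drop 3).take 3) :: ((out.drop 6).take 3) :: pvGoMid cs (i + 1) n rest
  | _ :: _, _, _, _ => []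

theorem pvRuleAB (c : Char) (v : Int) : pvRuleA c v = pvRuleB c v := by
  unfold pvRuleA pvRuleB
  split_ifs <;> omega

theorem pvRange8 : List.range 8 = [0, 1, 2, 3, 4, 5, 6, 7] := rfl

theorem pvStep (d : List Char) (last : Bool) (px : List Int)
    (hd : d.length = 8) (hp : px.length = 9) :
    pvEncodeA d last px = List.zipWith pvRuleB (d ++ [if last then '1' else '0']) px := by
  match d, px with
  | [c0, c1, c2, c3, c4, c5, c6, c7], [v0, v1, v2, v3, v4, v5, v6, v7, v8] =>
    cases last <;>
      simp [pvEncodeA, pvRange8, pvModAt, pvRuleAB, List.getD] <;>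
      (unfold pvRuleB; split_ifs <;> first | rfl | omega | simp_all)

theorem pvLenBin8 (n : Nat) : (pvBin8 n).length = 8 := by
  simp [pvBin8]

theorem pvMain (chars : List Char) (i n : Nat) (pixs : List (List Int))
    (h1 : 3 * chars.length ≤ pixs.length)
    (h2 : ∀ p ∈ pixs.take (3 * chars.length), 3 ≤ p.length) :
    modifyPixelGoA (convertData chars) i n pixs = pvGoMid chars i n pixs := by
  induction chars generalizing i pixs with
  | nil => rfl
  | cons c cs ih =>
    match pixs, h1 with
    | p1 :: p2 :: p3 :: rest, h1 =>
      have hmem : ∀ p ∈ [p1, p2, p3], 3 ≤ p.length := by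
        intro p hp
        apply h2
        have h3 : 3 * (c :: cs).length = 3 * cs.length + 3 := by simp; ring
        rw [h3]
        simp at hp ⊢
        rcases hp with h | h | h <;> simp [h]
      have hl1 : 3 ≤ p1.length := hmem p1 (by simp)
      have hl2 : 3 ≤ p2.length := hmem p2 (by simp)
      have hl3 : 3 ≤ p3.length := hmem p3 (by simp)
      have hpx : (p1.take 3 ++ p2.take 3 ++ p3.take 3).length = 9 := by
        simp [List.length_take]; omega
      have hstep := pvStep (pvBin8 c.toNat) (i == n - 1)
        (p1.take 3 ++ p2.take 3 ++ p3.take 3) (pvLenBin8 c.toNat) hpx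
      have htail : modifyPixelGoA (convertData cs) (i + 1) n rest = pvGoMid cs (i + 1) n rest := by
        apply ih
        · simp at h1; omega
        · intro p hp
          apply h2
          have h3 : 3 * (c :: cs).length = 3 * cs.length + 3 := by simp; ring
          rw [h3]
          simp [List.take_succ_cons] at hp ⊢
          tauto
      show (pvEncodeA (pvBin8 c.toNat) (i == n - 1) (p1.take 3 ++ p2.take 3 ++ p3.take 3)).take 3 :: _ :: _ :: modifyPixelGoA (convertData cs) (i + 1) n rest
           = _ :: _ :: _ :: pvGoMid cs (i + 1) n rest
      rw [hstep, htail]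

-- bit/char correspondence: pvBin8 is pvCharBits rendered as '0'/'1'
theorem pvBinChar (m : Nat) :
    pvBin8 m = (pvCharBits m).map (fun b => if b = 1 then '1' else '0') := by
  simp [pvBin8, pvCharBits, pvRange8, Nat.shiftRight_eq_div_pow]

-- the shared rule agrees with B's arithmetic adjustment (bits are 0 or 1)
theorem pvRuleAdjust (b : Nat) (v : Int) (hb : b = 0 ∨ b = 1) :
    pvRuleB (if b = 1 then '1' else '0') v = pvAdjust v b := by
  rcases hb with h | h <;> subst h <;>
    simp [pvRuleB, pvAdjust] <;> split_ifs <;> omega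

theorem pvCharBits01 (m : Nat) : ∀ b ∈ pvCharBits m, b = 0 ∨ b = 1 := by
  intro b hb
  simp [pvCharBits] at hb
  omega

theorem pvZipRule (bs : List Nat) (mk : Nat) (px : List Int)
    (hb : ∀ b ∈ bs, b = 0 ∨ b = 1) (hm : mk = 0 ∨ mk = 1) :
    List.zipWith pvRuleB ((bs.map (fun b => if b = 1 then '1' else '0')) ++ [if mk = 1 then '1' else '0']) px
      = List.zipWith pvAdjust px (bs ++ [mk]) := by
  induction bs generalizing px with
  | nil =>
    cases px with
    | nil => rfl
    | cons v vs => simp [pvRuleAdjust mk v hm]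
  | cons b bs ih =>
    cases px with
    | nil => rfl
    | cons v vs =>
      simp only [List.map_cons, List.cons_append, List.zipWith_cons_cons]
      rw [pvRuleAdjust b v (hb b (by simp)), ih vs (fun x hx => hb x (List.mem_cons_of_mem _ hx))]

theorem pvChunk3_nine (a r : List Int) (ha : a.length = 9) :
    pvChunk3 (a ++ r) = a.take 3 :: ((a.drop 3).take 3) :: ((a.drop 6).take 3) :: pvChunk3 r := by
  match a, ha with
  | [v0, v1, v2, v3, v4, v5, v6, v7, v8], _ => simp [pvChunk3]

theorem pvFlat (chars : List Char) (i n : Nat) (pixs : List (List Int))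
    (h1 : 3 * chars.length ≤ pixs.length)
    (h2 : ∀ p ∈ pixs.take (3 * chars.length), 3 ≤ p.length) :
    pvGoMid chars i n pixs
      = pvChunk3 (List.zipWith pvAdjust
          (((pixs.take (3 * chars.length)).map (fun p => p.take 3)).flatten)
          (pvBitsB chars i n)) := by
  induction chars generalizing i pixs with
  | nil => simp [pvGoMid, pvBitsB, pvChunk3]
  | cons c cs ih =>
    match pixs, h1 with
    | p1 :: p2 :: p3 :: rest, h1 =>
      have hmem : ∀ p ∈ [p1, p2, p3], 3 ≤ p.length := by
        intro p hp
        apply h2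
        have h3 : 3 * (c :: cs).length = 3 * cs.length + 3 := by simp; ring
        rw [h3]
        simp at hp ⊢
        rcases hp with h | h | h <;> simp [h]
      have hl1 : 3 ≤ p1.length := hmem p1 (by simp)
      have hl2 : 3 ≤ p2.length := hmem p2 (by simp)
      have hl3 : 3 ≤ p3.length := hmem p3 (by simp)
      have h3 : 3 * (c :: cs).length = 3 * cs.length + 3 := by simp; ring
      have htk : (p1 :: p2 :: p3 :: rest).take (3 * (c :: cs).length)
          = p1 :: p2 :: p3 :: rest.take (3 * cs.length) := by
        rw [h3]; rfl
      have hrest1 : 3 * cs.length ≤ rest.length := by simp at h1; omega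
      have hrest2 : ∀ p ∈ rest.take (3 * cs.length), 3 ≤ p.length := by
        intro p hp
        apply h2
        rw [htk]; simp [hp]
      have hb01 : ∀ b ∈ pvCharBits c.toNat, b = 0 ∨ b = 1 := pvCharBits01 c.toNat
      have hpx : (p1.take 3 ++ p2.take 3 ++ p3.take 3).length = 9 := by
        simp [List.length_take]; omega
      have hb9 : (pvCharBits c.toNat ++ [if i == n - 1 then 1 else 0]).length = 9 := by
        simp [pvCharBits]
      -- unfold one step on both sides
      rw [htk]
      show (List.zipWith pvRuleB _ _).take 3 :: _ :: _ :: pvGoMid cs (i + 1) n rest = _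
      have htarget :
          pvBin8 c.toNat ++ [if i == n - 1 then '1' else '0']
            = (pvCharBits c.toNat).map (fun b => if b = 1 then '1' else '0')
              ++ [if (if i == n - 1 then 1 else 0) = 1 then '1' else '0'] := by
        rw [pvBinChar]
        congr 1
        by_cases h : i == n - 1 <;> simp [h]
      have hzipc :
          List.zipWith pvRuleB (pvBin8 c.toNat ++ [if i == n - 1 then '1' else '0'])
              (p1.take 3 ++ p2.take 3 ++ p3.take 3)
            = List.zipWith pvAdjust (p1.take 3 ++ p2.take 3 ++ p3.take 3)
                (pvCharBits c.toNat ++ [if i == n - 1 then 1 else 0]) := by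
        rw [htarget]
        exact pvZipRule _ _ _ hb01 (by by_cases h : i == n - 1 <;> simp [h])
      have hsplit :
          List.zipWith pvAdjust
              ((p1.take 3 ++ p2.take 3 ++ p3.take 3) ++ ((rest.take (3 * cs.length)).map (fun p => p.take 3)).flatten)
              ((pvCharBits c.toNat ++ [if i == n - 1 then 1 else 0]) ++ pvBitsB cs (i + 1) n)
            = List.zipWith pvAdjust (p1.take 3 ++ p2.take 3 ++ p3.take 3)
                (pvCharBits c.toNat ++ [if i == n - 1 then 1 else 0])
              ++ List.zipWith pvAdjust (((rest.take (3 * cs.length)).map (fun p => p.take 3)).flatten)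
                  (pvBitsB cs (i + 1) n) := by
        apply List.zipWith_append
        rw [hpx, hb9]
      have hz9 : (List.zipWith pvAdjust (p1.take 3 ++ p2.take 3 ++ p3.take 3)
          (pvCharBits c.toNat ++ [if i == n - 1 then 1 else 0])).length = 9 := by
        rw [List.length_zipWith, hpx, hb9]; rfl
      have hassoc :
          p1.take 3 ++ (p2.take 3 ++ (p3.take 3 ++ ((rest.take (3 * cs.length)).map (fun p => p.take 3)).flatten))
            = (p1.take 3 ++ p2.take 3 ++ p3.take 3)
              ++ ((rest.take (3 * cs.length)).map (fun p => p.take 3)).flatten := by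
        simp [List.append_assoc]
      simp only [List.map_cons, List.flatten_cons, pvBitsB]
      rw [hassoc, hsplit, pvChunk3_nine _ _ hz9, hzipc, ih (i + 1) rest hrest1 hrest2]

-- ===== VERDICT (by name: the statement is the Claim_ definition above) =====
theorem modifyPixel_spec : Claim_equal_modifyPixel := by
  intro pix data _hdom hpre
  unfold Spec_modifyPixel
  obtain ⟨h1, h2⟩ := hpre
  have hlen : data.length = data.toList.length := rfl
  rw [hlen] at h1 h2
  show modifyPixelGoA (convertData data.toList) 0 (convertData data.toList).length pix
      = pvChunk3 (List.zipWith pvAdjust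
          (((pix.take (3 * data.toList.length)).map (fun p => p.take 3)).flatten)
          (pvBitsB data.toList 0 data.toList.length))
  rw [show (convertData data.toList).length = data.toList.length by simp [convertData]]
  rw [pvMain data.toList 0 data.toList.length pix h1 h2]
  exact pvFlat data.toList 0 data.toList.length pix h1 h2
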